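-- pv_equiv track=rewrite | github.com/Fiddle-N/leetle | src/leetle/day_0080_find_the_first_non_repeating_character.py | solve
-- ===== SOURCE A (Python) =====
-- def solve(s):
--     last_char = None
--     last_count = 0
--     for char in s:
--         if last_char != char:
--             if last_count == 1:
--                 return last_char
--             last_char = char
--             last_count = 1
--         else:
--             # char is repeating
--             last_count += 1
--     if last_count == 1:
--         return last_char
--     return ""
-- ===== SOURCE B (Python) =====
-- def solve(s):
--     n = len(s)
--     for i in range(n):
--         if (i == 0 or s[i - 1] != s[i]) and (i == n - 1 or s[i + 1] != s[i]):
--             return s[i]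
--     return ""
-- ===== Notes on version B (the rewrite author's own statement) =====
-- stated objective: simpler
-- what changed: B replaces A's run-length state machine (last_char/last_count with deferred emission) by a direct neighbour test: a character is the answer iff it differs from both its left and right neighbour; no counter state is maintained.
import Mathlib
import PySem

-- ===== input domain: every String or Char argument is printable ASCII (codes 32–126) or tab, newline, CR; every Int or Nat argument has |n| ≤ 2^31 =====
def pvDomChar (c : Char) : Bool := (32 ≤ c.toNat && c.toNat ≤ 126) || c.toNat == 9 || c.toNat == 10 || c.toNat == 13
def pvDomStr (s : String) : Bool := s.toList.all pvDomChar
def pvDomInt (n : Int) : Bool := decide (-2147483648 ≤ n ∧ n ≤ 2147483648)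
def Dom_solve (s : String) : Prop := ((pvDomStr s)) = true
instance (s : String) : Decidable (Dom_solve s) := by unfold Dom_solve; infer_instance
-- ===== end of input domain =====

-- B replaces A's run-length state machine by a direct neighbour test (simpler, same O(n) cost).

-- ===== PORT A =====
-- A's for-loop with early return; state = (last_char : Option Char, last_count : Int).
def solveLoopA : List Char → Option Char → Int → String
  | [], lc, cnt =>
      if cnt = 1 then (match lc with | some c => String.ofList [c] | none => "") else ""
  | c :: rest, lc, cnt =>
      if lc ≠ some c then
        if cnt = 1 then (match lc with | some c' => String.ofList [c'] | none => "")
        else solveLoopA rest (some c) 1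
      else solveLoopA rest lc (cnt + 1)

def solve (s : String) : String := solveLoopA s.toList none 0

-- ===== PORT B =====
-- B's index loop over s testing s[i-1] ≠ s[i] and s[i+1] ≠ s[i]; ported structurally:
-- prev carries s[i-1] (none at i = 0), rest.head? is s[i+1] (none at i = n-1).
def solveLoopB : Option Char → List Char → String
  | _, [] => ""
  | prev, c :: rest =>
      if prev ≠ some c ∧ rest.head? ≠ some c then String.ofList [c]
      else solveLoopB (some c) rest

def solve_alt (s : String) : String := solveLoopB none s.toList

-- ===== PRECONDITION & SPEC =====
def Spec_solve (s : String) (out : String) : Prop := out = solve_alt s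
instance (s : String) (out : String) : Decidable (Spec_solve s out) := by unfold Spec_solve; infer_instance

-- ===== CLAIM (what is proved, stated in full; the proofs are below) =====
def Claim_equal_solve : Prop := ∀ (s : String), Dom_solve s → Spec_solve s (solve s)

-- ===== LEMMAS AND PROOFS =====
-- Joint invariant: having just started a run at c (count 1), A returns c iff the run is a
-- singleton, which is B's neighbour test; inside a run (count ≥ 2) both skip repeats alike.
theorem loop_inv (rest : List Char) :
    (∀ c : Char, solveLoopA rest (some c) 1 =
      if rest.head? = some c then solveLoopB (some c) rest else String.ofList [c]) ∧
    (∀ (c : Char) (cnt : Int), 2 ≤ cnt →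
      solveLoopA rest (some c) cnt = solveLoopB (some c) rest) := by
  induction rest with
  | nil =>
      constructor
      · intro c; simp [solveLoopA]
      · intro c cnt h; simp [solveLoopA, solveLoopB]; omega
  | cons d t ih =>
      constructor
      · intro c
        by_cases hdc : d = c
        · subst hdc
          have h2 := ih.2 d 2 (by omega)
          simp [solveLoopA, solveLoopB, h2]
        · simp [solveLoopA, hdc, Ne.symm hdc]
      · intro c cnt h
        by_cases hdc : d = c
        · subst hdc
          have h2 := ih.2 d (cnt + 1) (by omega)
          simpa [solveLoopA, solveLoopB] using h2
        · have h1 := ih.1 d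
          have hne : ¬ cnt = 1 := by omega
          simp [solveLoopA, solveLoopB, Ne.symm hdc, hne, h1]

-- ===== VERDICT (by name: the statement is the Claim_ definition above) =====
theorem solve_spec : Claim_equal_solve := by
  intro s _
  unfold Spec_solve solve solve_alt
  cases hl : s.toList with
  | nil => simp [solveLoopA, solveLoopB]
  | cons c t =>
      have h1 := (loop_inv t).1 c
      simp [solveLoopA, solveLoopB, h1]
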